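-- pv_equiv track=rewrite | github.com/gaigechunfengchumandi/chishan | utils/segment_500hz/segment_500hz_openvino.py | insert_missing_points
-- ===== SOURCE A (Python) =====
-- def insert_missing_points(label_x, missing_threshold=30):# 插入缺失点
--     miss_value = []
--     for i in range(len(label_x)-1):
--         if 0 < label_x[i+1]-label_x[i] < missing_threshold: # 如果两个标签之间的间隔大于0小于30
--             miss_range = range(label_x[i]+1, label_x[i+1]) # 两个标签之间的间隔
--             miss_value.extend(miss_range)
--     for value in miss_value:
--         label_x.insert(label_x.index(value-1)+1, value)# 在前一个值的索引位置+1的位置插入这个值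
--
--     return label_x
-- ===== SOURCE B (Python) =====
-- def insert_missing_points(label_x, missing_threshold=30):
--     # Collect each gap's missing points under the gap's left label in one pass,
--     # then emit them after that label's first occurrence in a second pass.
--     # Mutates label_x in place, like the original.
--     fills = {}
--     for a, b in zip(label_x, label_x[1:]):
--         if 0 < b - a < missing_threshold:
--             fills.setdefault(a, []).extend(range(a + 1, b))
--     out = []
--     seen = set()
--     for x in label_x:
--         out.append(x)
--         if x not in seen:
--             seen.add(x)
--             out.extend(fills.get(x, []))
--     label_x[:] = out
--     return label_x
-- ===== Notes on version B (the rewrite author's own statement) =====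
-- stated objective: faster
-- what changed: Replaces the two-phase buffer-then-insert algorithm, whose every insertion rescans the whole list with list.index, by two linear passes (a dict of each gap's missing points keyed by the gap's left label, then one output pass emitting them after that label's first occurrence); Pre_ excludes non-increasing label lists where a fillable gap is preceded by a strictly larger label, on which A's first-occurrence list.index capture scatters fill values — a first-match placement artefact where either placement is defensible.
-- outside the precondition, e.g. on insert_missing_points([1, 3, 2, 4], 30): A returns [1, 2, 3, 3, 2, 4], B returns [1, 2, 3, 2, 3, 4]; on insert_missing_points([0, 2, 1, 3], 30): A returns [0, 1, 2, 2, 1, 3], B returns [0, 1, 2, 1, 2, 3]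
import Mathlib
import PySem

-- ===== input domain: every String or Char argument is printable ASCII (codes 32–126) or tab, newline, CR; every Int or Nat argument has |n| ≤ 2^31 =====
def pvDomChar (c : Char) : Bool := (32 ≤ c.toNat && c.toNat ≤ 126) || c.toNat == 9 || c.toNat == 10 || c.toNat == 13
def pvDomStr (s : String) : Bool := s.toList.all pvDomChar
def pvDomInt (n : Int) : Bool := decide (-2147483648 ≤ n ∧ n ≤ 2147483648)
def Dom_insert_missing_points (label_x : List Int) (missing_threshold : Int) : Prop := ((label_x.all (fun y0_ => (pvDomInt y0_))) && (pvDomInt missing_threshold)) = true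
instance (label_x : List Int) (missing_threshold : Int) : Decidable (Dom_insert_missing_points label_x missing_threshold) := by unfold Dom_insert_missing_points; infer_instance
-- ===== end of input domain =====

-- B replaces A's quadratic buffer-then-insert-via-list.index algorithm by a linear two-pass
-- algorithm: a dict collects each gap's missing points under the gap's left label, and one
-- output pass emits them after that label's first occurrence; equal on Pre_ (no fillable gap
-- preceded by a strictly larger label). Both Pythons mutate label_x in place; the theorems are
-- about the return value.


-- ===== PORT A =====
-- first loop: collect miss_value from consecutive pairs of the (unmutated) list
def impPhase1 (label_x : List Int) (missing_threshold : Int) : List Int :=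
  (PySem.List.pyRange 0 ((label_x.length : Int) - 1) 1).foldl
    (fun miss_value i =>
      if 0 < PySem.List.pyGetD label_x (i + 1) 0 - PySem.List.pyGetD label_x i 0 ∧
         PySem.List.pyGetD label_x (i + 1) 0 - PySem.List.pyGetD label_x i 0 < missing_threshold
      then miss_value ++ PySem.List.pyRange (PySem.List.pyGetD label_x i 0 + 1) (PySem.List.pyGetD label_x (i + 1) 0) 1
      else miss_value) []

-- second loop's body: label_x.insert(label_x.index(value-1)+1, value); value-1 is always
-- present in the list here, so Python's .index never raises and the 'none' arm is unreachable
def impInsert (l : List Int) (v : Int) : List Int :=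
  match PySem.List.index? l (v - 1) with
  | some j => PySem.List.insert l ((j : Int) + 1) v
  | none => l

def insert_missing_points (label_x : List Int) (missing_threshold : Int) : List Int :=
  (impPhase1 label_x missing_threshold).foldl impInsert label_x

-- ===== PORT B =====
-- Source B's first pass: fills.setdefault(a, []).extend(range(a+1, b)) over zip(label_x, label_x[1:])
def altFills (label_x : List Int) (missing_threshold : Int) : PySem.Dict Int (List Int) :=
  (label_x.zip (PySem.List.slice label_x (some 1) none)).foldl
    (fun fills ab =>
      if 0 < ab.2 - ab.1 ∧ ab.2 - ab.1 < missing_threshold then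
        fills.insert ab.1 (fills.getD ab.1 [] ++ PySem.List.pyRange (ab.1 + 1) ab.2 1)
      else fills)
    PySem.Dict.empty

-- Source B's second pass: out.append(x); on x's first occurrence also out.extend(fills.get(x, []))
def altPass (label_x : List Int) (fills : PySem.Dict Int (List Int)) : List Int × PySem.Set Int :=
  label_x.foldl
    (fun st x =>
      if PySem.Set.contains st.2 x then (st.1 ++ [x], st.2)
      else (st.1 ++ [x] ++ fills.getD x [], PySem.Set.add st.2 x))
    ([], PySem.Set.empty)

def insert_missing_points_alt (label_x : List Int) (missing_threshold : Int) : List Int :=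
  (altPass label_x (altFills label_x missing_threshold)).1

-- ===== PRECONDITION & SPEC =====
-- Pre_ excludes lists in which some fillable gap (width 2..threshold-1) is preceded by a
-- strictly larger label: on such non-increasing label lists A's list.index places each missing
-- point after the FIRST occurrence of its predecessor, so earlier larger labels (or earlier
-- inserted fills) capture and scatter a gap's fill values (A([1,3,2,4],30) = [1,2,3,3,2,4]),
-- while B keeps the gap's fill together after the first occurrence of the gap's left label
-- ([1,2,3,2,3,4]) — a first-match placement artefact on inputs that violate the function's
-- increasing-label-position contract, where either placement is as defensible as the other.
def Pre_insert_missing_points (label_x : List Int) (missing_threshold : Int) : Prop :=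
  ∀ i < label_x.tail.length, ∀ j < i,
    1 < label_x.getD (i + 1) 0 - label_x.getD i 0 →
    label_x.getD (i + 1) 0 - label_x.getD i 0 < missing_threshold →
    label_x.getD j 0 ≤ label_x.getD i 0

instance (label_x : List Int) (missing_threshold : Int) : Decidable (Pre_insert_missing_points label_x missing_threshold) := by unfold Pre_insert_missing_points; infer_instance

def pvWitness_insert_missing_points : List Int × Int := ([1, 2, 5], 30)

def Spec_insert_missing_points (label_x : List Int) (missing_threshold : Int) (out : List Int) : Prop := out = insert_missing_points_alt label_x missing_threshold
instance (label_x : List Int) (missing_threshold : Int) (out : List Int) : Decidable (Spec_insert_missing_points label_x missing_threshold out) := by unfold Spec_insert_missing_points; infer_instance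

-- ===== CLAIM (what is proved, stated in full; the proofs are below) =====
def Claim_equal_insert_missing_points : Prop := ∀ (label_x : List Int) (missing_threshold : Int), Dom_insert_missing_points label_x missing_threshold → Pre_insert_missing_points label_x missing_threshold → Spec_insert_missing_points label_x missing_threshold (insert_missing_points label_x missing_threshold)

-- ===== LEMMAS AND PROOFS =====

-- A's first loop equals the structural pair recursion missOf
def missOf : List Int → Int → List Int
  | [], _ => []
  | [_], _ => []
  | a :: b :: r, t =>
    (if 0 < b - a ∧ b - a < t then PySem.List.pyRange (a + 1) b 1 else []) ++ missOf (b :: r) t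

def fillAt (xs : List Int) (t : Int) (j : Nat) : List Int :=
  if 0 < xs.getD (j + 1) 0 - xs.getD j 0 ∧ xs.getD (j + 1) 0 - xs.getD j 0 < t
  then PySem.List.pyRange (xs.getD j 0 + 1) (xs.getD (j + 1) 0) 1
  else []

theorem flat_missOf (t : Int) : ∀ xs : List Int,
    (List.range (xs.length - 1)).flatMap (fillAt xs t) = missOf xs t
  | [] => rfl
  | [_] => rfl
  | a :: b :: r => by
    have hlen : (a :: b :: r).length - 1 = r.length + 1 := by simp
    rw [hlen, List.range_succ_eq_map, List.flatMap_cons, List.flatMap_map]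
    have hshift : (fun j => fillAt (a :: b :: r) t (Nat.succ j)) = fillAt (b :: r) t := by
      funext j
      simp only [fillAt, Nat.succ_eq_add_one, List.getD_cons_succ]
    rw [hshift]
    have hhead : fillAt (a :: b :: r) t 0
        = (if 0 < b - a ∧ b - a < t then PySem.List.pyRange (a + 1) b 1 else []) := by
      simp [fillAt]
    rw [hhead]
    have ih := flat_missOf t (b :: r)
    simp only [List.length_cons, Nat.add_sub_cancel] at ih
    rw [ih]
    rfl

theorem phase1_eq (xs : List Int) (t : Int) : impPhase1 xs t = missOf xs t := by
  rw [← flat_missOf t xs]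
  unfold impPhase1
  have hfun : (fun (miss_value : List Int) (i : Int) =>
      if 0 < PySem.List.pyGetD xs (i + 1) 0 - PySem.List.pyGetD xs i 0 ∧
         PySem.List.pyGetD xs (i + 1) 0 - PySem.List.pyGetD xs i 0 < t
      then miss_value ++ PySem.List.pyRange (PySem.List.pyGetD xs i 0 + 1) (PySem.List.pyGetD xs (i + 1) 0) 1
      else miss_value)
      = (fun (miss_value : List Int) (i : Int) => miss_value ++
          (if 0 < PySem.List.pyGetD xs (i + 1) 0 - PySem.List.pyGetD xs i 0 ∧
              PySem.List.pyGetD xs (i + 1) 0 - PySem.List.pyGetD xs i 0 < t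
           then PySem.List.pyRange (PySem.List.pyGetD xs i 0 + 1) (PySem.List.pyGetD xs (i + 1) 0) 1
           else [])) := by
    funext acc i
    split_ifs <;> simp
  rw [hfun, PySem.List.foldl_append_eq_flatMap, PySem.List.pyRange_one, List.flatMap_map,
    List.nil_append]
  have hN : ((xs.length : Int) - 1 - 0).toNat = xs.length - 1 := by omega
  rw [hN]
  congr 1
  funext j
  have h0 : (0 : Int) + (j : Int) = ((j : Nat) : Int) := by omega
  rw [h0]
  have h1 : (j : Int) + 1 = (((j + 1 : Nat)) : Int) := by push_cast; omega
  rw [h1, PySem.List.pyGetD_natCast, PySem.List.pyGetD_natCast]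
  rfl

theorem index?_append_of_not_mem (pre tl : List Int) (v : Int) (h : v ∉ pre) :
    PySem.List.index? (pre ++ tl) v = (PySem.List.index? tl v).map (· + pre.length) := by
  induction pre with
  | nil => simp [PySem.List.index?_eq_idxOf?, Option.map_id']
  | cons x xs ih =>
    simp only [List.mem_cons, not_or] at h
    rw [List.cons_append, PySem.List.index?_cons_of_ne _ (fun he => h.1 (Eq.symm he)),
        ih h.2, Option.map_map]
    cases PySem.List.index? tl v <;> simp

theorem impInsert_split (pre rest : List Int) (v : Int) (h : (v - 1) ∉ pre) :
    impInsert (pre ++ (v - 1) :: rest) v = pre ++ (v - 1) :: v :: rest := by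
  have hidx : PySem.List.index? (pre ++ (v - 1) :: rest) (v - 1) = some pre.length := by
    rw [index?_append_of_not_mem _ _ _ h, PySem.List.index?_cons_self]; simp
  unfold impInsert
  rw [hidx]
  simp only []
  have hcast : ((pre.length : Int) + 1) = ((pre.length + 1 : Nat) : Int) := by push_cast; ring
  rw [hcast, PySem.List.insert_natCast _ _ _ (by simp)]
  have hre : pre ++ (v - 1) :: rest = (pre ++ [v - 1]) ++ rest := by simp
  rw [hre, List.take_left' (by simp), List.drop_left' (by simp)]
  simp

theorem run_fold (c : Int) : ∀ (n : Nat) (a : Int) (pre rest : List Int),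
    n = (c - (a + 1)).toNat →
    (∀ w : Int, a ≤ w → w + 1 < c → w ∉ pre) →
    (PySem.List.pyRange (a + 1) c 1).foldl impInsert (pre ++ a :: rest)
      = pre ++ a :: (PySem.List.pyRange (a + 1) c 1 ++ rest) := by
  intro n
  induction n with
  | zero =>
    intro a pre rest hn hw
    rw [PySem.List.pyRange_one_eq_nil (by omega)]
    simp
  | succ n ih =>
    intro a pre rest hn hw
    rw [PySem.List.pyRange_one_cons (by omega)]
    simp only [List.foldl_cons]
    have ha : a ∉ pre := hw a le_rfl (by omega)
    have h1 : impInsert (pre ++ a :: rest) (a + 1) = pre ++ a :: (a + 1) :: rest := by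
      have h2 := impInsert_split pre rest (a + 1) (by simpa using ha)
      simpa using h2
    rw [h1]
    have hre : pre ++ a :: (a + 1) :: rest = (pre ++ [a]) ++ (a + 1) :: rest := by simp
    rw [hre, ih (a + 1) (pre ++ [a]) rest (by omega)
      (by
        intro w hw1 hw2
        simp only [List.mem_append, List.mem_singleton, not_or]
        exact ⟨hw w (by omega) hw2, by omega⟩)]
    simp

-- prefix of a list up to (excluding) the first occurrence of y
def pfx (l : List Int) (y : Int) : List Int := l.takeWhile (fun v => decide (v ≠ y))

-- insert f right after the first occurrence of y
def place : List Int → Int → List Int → List Int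
  | [], _, _ => []
  | x :: l, y, f => if x = y then x :: (f ++ l) else x :: place l y f

theorem pfx_cons (x : Int) (l : List Int) (a : Int) :
    pfx (x :: l) a = if x = a then [] else x :: pfx l a := by
  by_cases hxa : x = a
  · simp [pfx, hxa]
  · simp [pfx, hxa]

theorem place_nil : ∀ (l : List Int) (y : Int), place l y [] = l
  | [], _ => rfl
  | x :: l, y => by
    by_cases hxy : x = y
    · simp [place, hxy]
    · simp [place, hxy, place_nil l y]

theorem mem_place : ∀ (l : List Int) (y : Int) (f : List Int) (v : Int), v ∈ l → v ∈ place l y f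
  | x :: l, y, f, v, hv => by
    rcases List.mem_cons.mp hv with hv | hv
    · by_cases hxy : x = y <;> simp [place, hxy, hv]
    · by_cases hxy : x = y
      · simp [place, hxy, hv]
      · simp only [place, if_neg hxy, List.mem_cons]
        exact Or.inr (mem_place l y f v hv)

theorem place_append : ∀ (as bs : List Int) (y : Int) (f : List Int),
    (∀ v ∈ as, v ≠ y) → place (as ++ bs) y f = as ++ place bs y f
  | [], bs, y, f, _ => rfl
  | x :: as, bs, y, f, h => by
    have hx : x ≠ y := h x (by simp)
    simp only [List.cons_append, place, if_neg hx]
    rw [place_append as bs y f (fun v hv => h v (by simp [hv]))]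

theorem place_split (pre rest : List Int) (a : Int) (f : List Int) (h : ∀ v ∈ pre, v ≠ a) :
    place (pre ++ a :: rest) a f = pre ++ a :: (f ++ rest) := by
  rw [place_append pre (a :: rest) a f h]
  simp [place]

theorem pfx_split : ∀ (l : List Int) (a : Int), a ∈ l → ∃ rest, l = pfx l a ++ a :: rest
  | x :: l, a, h => by
    by_cases hxa : x = a
    · refine ⟨l, ?_⟩
      rw [pfx_cons, if_pos hxa, List.nil_append, hxa]
    · have hal : a ∈ l := by
        rcases List.mem_cons.mp h with h' | h'
        · exact absurd h'.symm hxa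
        · exact h'
      obtain ⟨rest, hrest⟩ := pfx_split l a hal
      refine ⟨rest, ?_⟩
      rw [pfx_cons, if_neg hxa, List.cons_append, ← hrest]

theorem mem_pfx_ne {l : List Int} {a v : Int} (h : v ∈ pfx l a) : v ≠ a := by
  have := List.mem_takeWhile_imp h
  simpa using this

theorem mem_pfx_append : ∀ (as bs : List Int) (y v : Int),
    v ∈ pfx (as ++ bs) y → v ∈ as ∨ v ∈ pfx bs y
  | [], bs, y, v, h => Or.inr h
  | x :: as, bs, y, v, h => by
    rw [List.cons_append, pfx_cons] at h
    by_cases hxy : x = y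
    · rw [if_pos hxy] at h; cases h
    · rw [if_neg hxy] at h
      rcases List.mem_cons.mp h with h' | h'
      · exact Or.inl (by simp [h'])
      · rcases mem_pfx_append as bs y v h' with h'' | h''
        · exact Or.inl (List.mem_cons_of_mem _ h'')
        · exact Or.inr h''

theorem pfx_place_mem : ∀ (l : List Int) (a : Int) (f : List Int) (a' v : Int),
    v ∈ pfx (place l a f) a' → v ∈ pfx l a' ∨ v ∈ f
  | [], a, f, a', v, h => by simp [place, pfx] at h
  | x :: l, a, f, a', v, h => by
    by_cases hxa : x = a
    · simp only [place, if_pos hxa] at h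
      rw [pfx_cons] at h
      by_cases hxa' : x = a'
      · rw [if_pos hxa'] at h; cases h
      · rw [if_neg hxa'] at h
        rcases List.mem_cons.mp h with h' | h'
        · exact Or.inl (by rw [pfx_cons, if_neg hxa']; simp [h'])
        · rcases mem_pfx_append f l a' v h' with h'' | h''
          · exact Or.inr h''
          · exact Or.inl (by rw [pfx_cons, if_neg hxa']; exact List.mem_cons_of_mem _ h'')
    · simp only [place, if_neg hxa] at h
      rw [pfx_cons] at h
      by_cases hxa' : x = a'
      · rw [if_pos hxa'] at h; cases h
      · rw [if_neg hxa'] at h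
        rcases List.mem_cons.mp h with h' | h'
        · exact Or.inl (by rw [pfx_cons, if_neg hxa']; simp [h'])
        · rcases pfx_place_mem l a f a' v h' with h'' | h''
          · exact Or.inl (by rw [pfx_cons, if_neg hxa']; exact List.mem_cons_of_mem _ h'')
          · exact Or.inr h''

theorem pfx_sub_pre : ∀ (pre l rest : List Int) (a : Int), l = pre ++ a :: rest →
    ∀ v ∈ pfx l a, v ∈ pre
  | [], l, rest, a, hl, v, hv => by
    subst hl
    rw [List.nil_append, pfx_cons, if_pos rfl] at hv
    cases hv
  | x :: pre, l, rest, a, hl, v, hv => by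
    subst hl
    rw [List.cons_append, pfx_cons] at hv
    by_cases hxa : x = a
    · rw [if_pos hxa] at hv; cases hv
    · rw [if_neg hxa] at hv
      rcases List.mem_cons.mp hv with h' | h'
      · exact List.mem_cons.mpr (Or.inl h')
      · exact List.mem_cons_of_mem _ (pfx_sub_pre pre _ rest a rfl v h')

-- A's fold of one gap's fill inserts it after the first occurrence of the gap's left label
theorem chunk (L : List Int) (a b : Int) (hmem : a ∈ L) (hlt : ∀ v ∈ pfx L a, v < a) :
    (PySem.List.pyRange (a + 1) b 1).foldl impInsert L
      = place L a (PySem.List.pyRange (a + 1) b 1) := by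
  obtain ⟨rest, hrest⟩ := pfx_split L a hmem
  have hpre : ∀ w : Int, a ≤ w → w + 1 < b → w ∉ pfx L a := by
    intro w hw _ hwp
    exact absurd (hlt w hwp) (by omega)
  calc (PySem.List.pyRange (a + 1) b 1).foldl impInsert L
      = (PySem.List.pyRange (a + 1) b 1).foldl impInsert (pfx L a ++ a :: rest) := by rw [← hrest]
    _ = pfx L a ++ a :: (PySem.List.pyRange (a + 1) b 1 ++ rest) :=
        run_fold b ((b - (a + 1)).toNat) a (pfx L a) rest rfl hpre
    _ = place (pfx L a ++ a :: rest) a (PySem.List.pyRange (a + 1) b 1) := by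
        rw [place_split _ _ _ _ (fun v hv => mem_pfx_ne hv)]
    _ = place L a (PySem.List.pyRange (a + 1) b 1) := by rw [← hrest]

-- structural form of the collision condition D_ (running maximum of the labels seen so far)
def eAux (m : Int) : List Int → Int → Bool
  | [], _ => false
  | [_], _ => false
  | a :: b :: r, t =>
    (decide (1 < b - a) && decide (b - a < t) && decide (a < m)) || eAux (max m a) (b :: r) t

theorem eAux_node {m a b t : Int} {r : List Int} (h : eAux m (a :: b :: r) t = false) :
    ¬(1 < b - a ∧ b - a < t ∧ a < m) ∧ eAux (max m a) (b :: r) t = false := by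
  simp only [eAux, Bool.or_eq_false_iff, Bool.and_eq_false_iff, decide_eq_false_iff_not,
    not_lt] at h
  refine ⟨?_, h.2⟩
  rintro ⟨h1, h2, h3⟩
  rcases h.1 with (h' | h') | h' <;> omega

theorem labels_le : ∀ (pre : List Int) (m t a b : Int) (post : List Int),
    eAux m (pre ++ a :: b :: post) t = false → 1 < b - a → b - a < t →
    m ≤ a ∧ ∀ z ∈ pre, z ≤ a
  | [], m, t, a, b, post, he, hw, ht => by
    simp only [List.nil_append] at he
    obtain ⟨hhd, _⟩ := eAux_node he
    exact ⟨by by_contra h; exact hhd ⟨hw, ht, by omega⟩, by simp⟩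
  | x :: pre, m, t, a, b, post, he, hw, ht => by
    obtain ⟨y, r, hyr⟩ : ∃ y r, pre ++ a :: b :: post = y :: r := by
      cases pre <;> exact ⟨_, _, rfl⟩
    rw [List.cons_append, hyr] at he
    obtain ⟨_, herec⟩ := eAux_node he
    rw [← hyr] at herec
    obtain ⟨hm, hpre⟩ := labels_le pre (max m x) t a b post herec hw ht
    refine ⟨by omega, ?_⟩
    intro z hz
    rcases List.mem_cons.mp hz with hz | hz
    · omega
    · exact hpre z hz

-- if a split of x :: xs exposes a fillable gap, the head is bounded by the gap's left label
theorem head_le_split {x : Int} {xs pre post : List Int} {m t a b : Int}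
    (he : eAux m (x :: xs) t = false) (hsplit : x :: xs = pre ++ a :: b :: post)
    (hw : 1 < b - a) (ht : b - a < t) : x ≤ a := by
  cases pre with
  | nil =>
    have : x = a := by simpa using congrArg (fun l => l.headD 0) hsplit
    omega
  | cons p ps =>
    have hx : x = p := by simpa using congrArg (fun l => l.headD 0) hsplit
    rw [hsplit] at he
    have := (labels_le (p :: ps) m t a b post he hw ht).2
    exact hx ▸ this p (by simp)

theorem eAux_imp : ∀ (l : List Int) (m t : Int), eAux m l t = true →
    ∃ i < l.tail.length, 1 < l.getD (i + 1) 0 - l.getD i 0 ∧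
      l.getD (i + 1) 0 - l.getD i 0 < t ∧
      (l.getD i 0 < m ∨ ∃ j < i, l.getD i 0 < l.getD j 0)
  | [], m, t, h => by simp [eAux] at h
  | [_], m, t, h => by simp [eAux] at h
  | a :: b :: r, m, t, h => by
    simp only [eAux, Bool.or_eq_true, Bool.and_eq_true, decide_eq_true_eq] at h
    rcases h with ⟨⟨h1, h2⟩, h3⟩ | h
    · exact ⟨0, by simp, by simpa using h1, by simpa using h2, Or.inl (by simpa using h3)⟩
    · obtain ⟨i, hi, hg1, hg2, hor⟩ := eAux_imp (b :: r) (max m a) t h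
      simp only [List.tail_cons] at hi
      refine ⟨i + 1, by simp only [List.tail_cons, List.length_cons]; omega, ?_, ?_, ?_⟩
      · simpa using hg1
      · simpa using hg2
      · simp only [List.getD_cons_succ]
        rcases hor with hm | ⟨j, hj, hjv⟩
        · by_cases hya : (b :: r).getD i 0 < a
          · exact Or.inr ⟨0, by omega, by simp only [List.getD_cons_zero]; omega⟩
          · exact Or.inl (by omega)
        · exact Or.inr ⟨j + 1, by omega, by simpa using hjv⟩

theorem eTop_not_pre (x : Int) (l : List Int) (t : Int)
    (h : eAux x (x :: l) t = true) : ¬ Pre_insert_missing_points (x :: l) t := by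
  intro hpre
  obtain ⟨i, hi, hg1, hg2, hor⟩ := eAux_imp (x :: l) x t h
  rcases hor with hm | ⟨j, hj, hjv⟩
  · have hipos : 0 < i := by
      by_contra h0
      have : i = 0 := by omega
      subst this
      simp only [List.getD_cons_zero] at hm
      omega
    have hle := hpre i hi 0 hipos hg1 hg2
    simp only [List.getD_cons_zero] at hle
    omega
  · have hle := hpre i hi j hj hg1 hg2
    omega

-- sequential in-place gap filling (the common shape of both programs outside D_)
def placeAllL : List Int → List Int → Int → List Int
  | L, [], _ => L
  | L, [_], _ => L
  | L, a :: b :: r, t =>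
    placeAllL (if 0 < b - a ∧ b - a < t then place L a (PySem.List.pyRange (a + 1) b 1) else L)
      (b :: r) t

-- the main A-side induction: outside the collision condition, A's insertion loop fills each
-- gap after the first occurrence of its left label
theorem thmA : ∀ (l L : List Int) (m t : Int),
    eAux m l t = false →
    (∀ pre a b post, l = pre ++ a :: b :: post → 1 < b - a → b - a < t →
        a ∈ L ∧ ∀ v ∈ pfx L a, v < a) →
    (missOf l t).foldl impInsert L = placeAllL L l t
  | [], L, m, t, _, _ => by simp [missOf, placeAllL]
  | [x], L, m, t, _, _ => by simp [missOf, placeAllL]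
  | a :: b :: r, L, m, t, he, hg => by
    obtain ⟨_, herec⟩ := eAux_node he
    show ((if 0 < b - a ∧ b - a < t then PySem.List.pyRange (a + 1) b 1 else [])
        ++ missOf (b :: r) t).foldl impInsert L = _
    rw [List.foldl_append]
    by_cases hc : 0 < b - a ∧ b - a < t
    · rw [if_pos hc]
      by_cases hw : 1 < b - a
      · obtain ⟨ha, hpfx⟩ := hg [] a b r rfl hw hc.2
        rw [chunk L a b ha hpfx]
        have hred : placeAllL L (a :: b :: r) t
            = placeAllL (place L a (PySem.List.pyRange (a + 1) b 1)) (b :: r) t := by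
          simp only [placeAllL, if_pos hc]
        rw [hred]
        apply thmA (b :: r) _ (max m a) t herec
        intro pre' a' b' post' hsplit hw' ht'
        obtain ⟨ha', hpfx'⟩ := hg (a :: pre') a' b' post' (by rw [List.cons_append, ← hsplit])
          hw' ht'
        refine ⟨mem_place _ _ _ _ ha', ?_⟩
        intro v hv
        rcases pfx_place_mem _ _ _ _ _ hv with hv' | hv'
        · exact hpfx' v hv'
        · rw [PySem.List.mem_pyRange_one] at hv'
          have hba' : b ≤ a' := head_le_split herec hsplit hw' ht'
          omega
      · have hre : PySem.List.pyRange (a + 1) b 1 = [] :=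
          PySem.List.pyRange_one_eq_nil (by omega)
        rw [hre]
        simp only [List.foldl_nil]
        have hred : placeAllL L (a :: b :: r) t = placeAllL L (b :: r) t := by
          simp only [placeAllL, if_pos hc, hre, place_nil]
        rw [hred]
        apply thmA (b :: r) L (max m a) t herec
        intro pre' a' b' post' hsplit hw' ht'
        exact hg (a :: pre') a' b' post' (by rw [List.cons_append, ← hsplit]) hw' ht'
    · rw [if_neg hc]
      simp only [List.foldl_nil]
      have hred : placeAllL L (a :: b :: r) t = placeAllL L (b :: r) t := by
        simp only [placeAllL, if_neg hc]
      rw [hred]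
      apply thmA (b :: r) L (max m a) t herec
      intro pre' a' b' post' hsplit hw' ht'
      exact hg (a :: pre') a' b' post' (by rw [List.cons_append, ← hsplit]) hw' ht'

-- B-side machinery: the dict of fills and the emission pass, in structural form
def dInsExt (d : PySem.Dict Int (List Int)) (k : Int) (f : List Int) :
    PySem.Dict Int (List Int) := d.insert k (d.getD k [] ++ f)

def dictOf : PySem.Dict Int (List Int) → List Int → Int → PySem.Dict Int (List Int)
  | d, [], _ => d
  | d, [_], _ => d
  | d, a :: b :: r, t =>
    dictOf (if 0 < b - a ∧ b - a < t then dInsExt d a (PySem.List.pyRange (a + 1) b 1) else d)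
      (b :: r) t

def bPass : PySem.Set Int → List Int → PySem.Dict Int (List Int) → List Int
  | _, [], _ => []
  | seen, x :: l, d =>
    x :: ((if PySem.Set.contains seen x then [] else d.getD x [])
      ++ bPass (PySem.Set.add seen x) l d)

theorem contains_false_iff (s : PySem.Set Int) (y : Int) :
    PySem.Set.contains s y = false ↔ y ∉ s := by
  rw [← Bool.not_eq_true, not_iff_not]
  exact PySem.Set.contains_iff s y

theorem getD_dInsExt_self (d : PySem.Dict Int (List Int)) (y : Int) (f : List Int) :
    (dInsExt d y f).getD y [] = d.getD y [] ++ f := by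
  rw [dInsExt]
  exact PySem.Dict.getD_insert_self d y _ _

theorem getD_dInsExt_ne (d : PySem.Dict Int (List Int)) (y k : Int) (f : List Int)
    (h : k ≠ y) : (dInsExt d y f).getD k [] = d.getD k [] := by
  rw [dInsExt, PySem.Dict.getD_insert]
  exact if_neg h

theorem bPass_congr (d₁ d₂ : PySem.Dict Int (List Int))
    (h : ∀ k, d₁.getD k [] = d₂.getD k []) : ∀ (xs : List Int) (seen : PySem.Set Int),
    bPass seen xs d₁ = bPass seen xs d₂
  | [], _ => rfl
  | x :: l, seen => by
    simp only [bPass, h x, bPass_congr d₁ d₂ h l (PySem.Set.add seen x)]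

theorem bPass_nilvals (d : PySem.Dict Int (List Int)) (h : ∀ k, d.getD k [] = []) :
    ∀ (xs : List Int) (seen : PySem.Set Int), bPass seen xs d = xs
  | [], _ => rfl
  | x :: l, seen => by
    simp only [bPass, h x, ite_self, List.nil_append, bPass_nilvals d h l (PySem.Set.add seen x)]

theorem bPass_insert_seen (d : PySem.Dict Int (List Int)) (y : Int) (f : List Int) :
    ∀ (xs : List Int) (seen : PySem.Set Int), PySem.Set.contains seen y = true →
    bPass seen xs (dInsExt d y f) = bPass seen xs d
  | [], _, _ => rfl
  | x :: l, seen, hy => by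
    have hy' : PySem.Set.contains (PySem.Set.add seen x) y = true := by
      rw [PySem.Set.contains_iff] at hy ⊢
      exact (PySem.Set.mem_add seen x y).mpr (Or.inl hy)
    have hrec := bPass_insert_seen d y f l (PySem.Set.add seen x) hy'
    by_cases hsx : PySem.Set.contains seen x = true
    · simp only [bPass, if_pos hsx, hrec]
    · have hxy : x ≠ y := fun he => hsx (he ▸ hy)
      simp only [bPass, if_neg hsx, hrec, getD_dInsExt_ne d y x f hxy]

theorem place_bPass : ∀ (xs : List Int) (seen : PySem.Set Int)
    (d : PySem.Dict Int (List Int)) (y : Int) (f : List Int),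
    y ∈ xs → PySem.Set.contains seen y = false → d.getD y [] = [] →
    (∀ k v, v ∈ d.getD k [] → v ≠ y) →
    place (bPass seen xs d) y f = bPass seen xs (dInsExt d y f)
  | [], _, _, y, _, hy, _, _, _ => absurd hy (by simp)
  | x :: l, seen, d, y, f, hy, hseen, hget, hvals => by
    by_cases hxy : x = y
    · subst hxy
      have hcn : ¬ (PySem.Set.contains seen x = true) := by
        rw [hseen]; exact Bool.false_ne_true
      have h1 : bPass seen (x :: l) d = x :: bPass (PySem.Set.add seen x) l d := by
        simp only [bPass, hget, ite_self, List.nil_append]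
      have h2 : place (x :: bPass (PySem.Set.add seen x) l d) x f
          = x :: (f ++ bPass (PySem.Set.add seen x) l d) := by
        simp [place]
      have h3 : bPass seen (x :: l) (dInsExt d x f)
          = x :: (f ++ bPass (PySem.Set.add seen x) l (dInsExt d x f)) := by
        simp only [bPass, if_neg hcn, getD_dInsExt_self, hget, List.nil_append]
      rw [h1, h2, h3, bPass_insert_seen d x f l (PySem.Set.add seen x) (by
        rw [PySem.Set.contains_iff]
        exact (PySem.Set.mem_add seen x x).mpr (Or.inr rfl))]
    · have hyl : y ∈ l := by
        rcases List.mem_cons.mp hy with h | h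
        · exact absurd h.symm hxy
        · exact h
      have hem : ∀ v ∈ (if PySem.Set.contains seen x then [] else d.getD x []), v ≠ y := by
        intro v hv
        by_cases hsx : PySem.Set.contains seen x = true
        · rw [if_pos hsx] at hv; cases hv
        · rw [if_neg hsx] at hv; exact hvals x v hv
      have hseen' : PySem.Set.contains (PySem.Set.add seen x) y = false := by
        rw [contains_false_iff] at hseen ⊢
        rw [PySem.Set.mem_add]
        rintro (h | h)
        · exact hseen h
        · exact hxy h.symm
      have h1 : place (bPass seen (x :: l) d) y f
          = x :: ((if PySem.Set.contains seen x then [] else d.getD x [])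
              ++ place (bPass (PySem.Set.add seen x) l d) y f) := by
        simp only [bPass, place, if_neg hxy]
        rw [place_append _ _ _ _ hem]
      rw [h1, place_bPass l (PySem.Set.add seen x) d y f hyl hseen' hget hvals]
      simp only [bPass, getD_dInsExt_ne d y x f hxy]

theorem getD_dInsExt_nil (d : PySem.Dict Int (List Int)) (a : Int) :
    ∀ k, (dInsExt d a []).getD k [] = d.getD k [] := by
  intro k
  by_cases hk : k = a
  · subst hk
    rw [getD_dInsExt_self]
    simp
  · rw [getD_dInsExt_ne d a k [] hk]

-- the main B-side induction: B's dict pass performs the same sequential placements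
theorem thmB : ∀ (l xs : List Int) (d : PySem.Dict Int (List Int)) (m t : Int),
    eAux m l t = false →
    (∀ pre a b post, l = pre ++ a :: b :: post → 1 < b - a → b - a < t →
        a ∈ xs ∧ d.getD a [] = [] ∧ ∀ k v, v ∈ d.getD k [] → v ≠ a) →
    placeAllL (bPass PySem.Set.empty xs d) l t = bPass PySem.Set.empty xs (dictOf d l t)
  | [], xs, d, m, t, _, _ => by simp [placeAllL, dictOf]
  | [x], xs, d, m, t, _, _ => by simp [placeAllL, dictOf]
  | a :: b :: r, xs, d, m, t, he, hg => by
    obtain ⟨_, herec⟩ := eAux_node he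
    by_cases hc : 0 < b - a ∧ b - a < t
    · by_cases hw : 1 < b - a
      · obtain ⟨haxs, hget, hvals⟩ := hg [] a b r rfl hw hc.2
        have hplace : place (bPass PySem.Set.empty xs d) a (PySem.List.pyRange (a + 1) b 1)
            = bPass PySem.Set.empty xs (dInsExt d a (PySem.List.pyRange (a + 1) b 1)) :=
          place_bPass xs PySem.Set.empty d a _ haxs rfl hget hvals
        have hred : placeAllL (bPass PySem.Set.empty xs d) (a :: b :: r) t
            = placeAllL (bPass PySem.Set.empty xs
                (dInsExt d a (PySem.List.pyRange (a + 1) b 1))) (b :: r) t := by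
          simp only [placeAllL, if_pos hc, hplace]
        have hdict : dictOf d (a :: b :: r) t
            = dictOf (dInsExt d a (PySem.List.pyRange (a + 1) b 1)) (b :: r) t := by
          simp only [dictOf, if_pos hc]
        rw [hred, hdict]
        apply thmB (b :: r) xs _ (max m a) t herec
        intro pre' a' b' post' hsplit hw' ht'
        obtain ⟨ha'xs, hget', hvals'⟩ := hg (a :: pre') a' b' post'
          (by rw [List.cons_append, ← hsplit]) hw' ht'
        have hba' : b ≤ a' := head_le_split herec hsplit hw' ht'
        have haa' : a' ≠ a := by omega
        refine ⟨ha'xs, ?_, ?_⟩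
        · rw [getD_dInsExt_ne d a a' _ haa']
          exact hget'
        · intro k v hv
          by_cases hk : k = a
          · subst hk
            rw [getD_dInsExt_self, hget, List.nil_append, PySem.List.mem_pyRange_one] at hv
            omega
          · rw [getD_dInsExt_ne d a k _ hk] at hv
            exact hvals' k v hv
      · have hre : PySem.List.pyRange (a + 1) b 1 = [] :=
          PySem.List.pyRange_one_eq_nil (by omega)
        have hred : placeAllL (bPass PySem.Set.empty xs d) (a :: b :: r) t
            = placeAllL (bPass PySem.Set.empty xs d) (b :: r) t := by
          simp only [placeAllL, if_pos hc, hre, place_nil]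
        have hdict : dictOf d (a :: b :: r) t = dictOf (dInsExt d a []) (b :: r) t := by
          simp only [dictOf, if_pos hc, hre]
        rw [hred, hdict,
          bPass_congr d (dInsExt d a []) (fun k => (getD_dInsExt_nil d a k).symm) xs
            PySem.Set.empty]
        apply thmB (b :: r) xs _ (max m a) t herec
        intro pre' a' b' post' hsplit hw' ht'
        obtain ⟨ha'xs, hget', hvals'⟩ := hg (a :: pre') a' b' post'
          (by rw [List.cons_append, ← hsplit]) hw' ht'
        refine ⟨ha'xs, ?_, ?_⟩
        · rw [getD_dInsExt_nil]; exact hget'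
        · intro k v hv
          rw [getD_dInsExt_nil] at hv
          exact hvals' k v hv
    · have hred : placeAllL (bPass PySem.Set.empty xs d) (a :: b :: r) t
          = placeAllL (bPass PySem.Set.empty xs d) (b :: r) t := by
        simp only [placeAllL, if_neg hc]
      have hdict : dictOf d (a :: b :: r) t = dictOf d (b :: r) t := by
        simp only [dictOf, if_neg hc]
      rw [hred, hdict]
      apply thmB (b :: r) xs d (max m a) t herec
      intro pre' a' b' post' hsplit hw' ht'
      exact hg (a :: pre') a' b' post' (by rw [List.cons_append, ← hsplit]) hw' ht'

-- bridges from the literal B port to the structural forms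
theorem altFills_fold (t : Int) : ∀ (l : List Int) (d : PySem.Dict Int (List Int)),
    ((l.zip l.tail).foldl
      (fun fills ab =>
        if 0 < ab.2 - ab.1 ∧ ab.2 - ab.1 < t then
          fills.insert ab.1 (fills.getD ab.1 [] ++ PySem.List.pyRange (ab.1 + 1) ab.2 1)
        else fills) d) = dictOf d l t
  | [], d => rfl
  | [_], d => rfl
  | a :: b :: r, d => by
    have ih := altFills_fold t (b :: r)
      (if 0 < b - a ∧ b - a < t
       then d.insert a (d.getD a [] ++ PySem.List.pyRange (a + 1) b 1) else d)
    simp only [List.tail_cons] at ih ⊢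
    rw [List.zip_cons_cons, List.foldl_cons]
    rw [ih]
    rfl

theorem altPass_fold (fills : PySem.Dict Int (List Int)) :
    ∀ (xs out : List Int) (seen : PySem.Set Int),
    (xs.foldl
      (fun st x =>
        if PySem.Set.contains st.2 x then (st.1 ++ [x], st.2)
        else (st.1 ++ [x] ++ fills.getD x [], PySem.Set.add st.2 x))
      (out, seen)).1 = out ++ bPass seen xs fills
  | [], out, seen => by simp [bPass]
  | x :: l, out, seen => by
    simp only [List.foldl_cons]
    by_cases hsx : PySem.Set.contains seen x = true
    · rw [if_pos hsx, altPass_fold fills l (out ++ [x]) seen]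
      have hadd : PySem.Set.add seen x = seen :=
        PySem.Set.add_of_mem ((PySem.Set.contains_iff seen x).mp hsx)
      have hb : bPass seen (x :: l) fills = x :: bPass seen l fills := by
        simp only [bPass, if_pos hsx, hadd, List.nil_append]
      rw [hb]
      simp
    · rw [if_neg hsx, altPass_fold fills l (out ++ [x] ++ fills.getD x [])
        (PySem.Set.add seen x)]
      have hb : bPass seen (x :: l) fills
          = x :: (fills.getD x [] ++ bPass (PySem.Set.add seen x) l fills) := by
        simp only [bPass, if_neg hsx]
      rw [hb]
      simp

theorem alt_eq (xs : List Int) (t : Int) : insert_missing_points_alt xs t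
    = bPass PySem.Set.empty xs (dictOf PySem.Dict.empty xs t) := by
  unfold insert_missing_points_alt altPass altFills
  rw [PySem.List.slice_from_one, altFills_fold t xs PySem.Dict.empty,
    altPass_fold _ xs [] PySem.Set.empty]
  simp

-- ===== VERDICT (by name: the statements are the Claim_ definitions above) =====
theorem insert_missing_points_spec : Claim_equal_insert_missing_points := by
  unfold Claim_equal_insert_missing_points
  intro xs t _ hpre
  show (impPhase1 xs t).foldl impInsert xs = insert_missing_points_alt xs t
  rw [phase1_eq, alt_eq]
  cases xs with
  | nil => simp [missOf, bPass]
  | cons x l =>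
    have he : eAux x (x :: l) t = false := by
      cases h : eAux x (x :: l) t with
      | false => rfl
      | true => exact absurd hpre (eTop_not_pre x l t h)
    have hA := thmA (x :: l) (x :: l) x t he (by
      intro pre a b post hsplit hw ht
      constructor
      · rw [hsplit]; simp
      · intro v hv
        have hvne : v ≠ a := mem_pfx_ne hv
        have hvpre : v ∈ pre := pfx_sub_pre pre (x :: l) (b :: post) a hsplit v hv
        have hvle : v ≤ a := by
          rw [hsplit] at he
          exact (labels_le pre x t a b post he hw ht).2 v hvpre
        omega)
    rw [hA]
    have hB := thmB (x :: l) (x :: l) PySem.Dict.empty x t he (by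
      intro pre a b post hsplit hw ht
      refine ⟨by rw [hsplit]; simp, by simp [PySem.Dict.getD_empty], ?_⟩
      intro k v hv
      simp [PySem.Dict.getD_empty] at hv)
    rw [← hB]
    congr 1
    exact (bPass_nilvals PySem.Dict.empty (fun k => by simp [PySem.Dict.getD_empty]) (x :: l)
      PySem.Set.empty).symm
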